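-- pv_equiv track=rewrite | github.com/Ryuya-dot-com/Accentedness | Stimuli/tts_from_stimuli.py | ensure_unique_aliases
-- ===== SOURCE A (Python) =====
-- from collections import defaultdict
--
-- def ensure_unique_aliases(specs: list[tuple[str, str]]) -> list[tuple[str, str]]:
--     counts: defaultdict[str, int] = defaultdict(int)
--     out: list[tuple[str, str]] = []
--     for alias, voice in specs:
--         counts[alias] += 1
--         final_alias = alias if counts[alias] == 1 else f"{alias}_{counts[alias]}"
--         out.append((final_alias, voice))
--     return out
-- ===== SOURCE B (Python) =====
-- def ensure_unique_aliases(specs: list[tuple[str, str]]) -> list[tuple[str, str]]: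
--     out = [None] * len(specs)
--     for alias in dict.fromkeys(a for a, _ in specs):
--         n = 0
--         for i, (a, voice) in enumerate(specs):
--             if a == alias:
--                 n += 1
--                 out[i] = (alias if n == 1 else f"{alias}_{n}", voice)
--     return out
-- ===== Notes on version B (the rewrite author's own statement) =====
-- stated objective: alternative
-- what changed: Replaces A's single streaming pass with a running dict counter by a group-then-scatter scheme: for each distinct alias (first-occurrence order) a dedicated pass numbers that alias's occurrences and writes the suffixed names into a preallocated output list at their original indices.
import Mathlib
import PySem

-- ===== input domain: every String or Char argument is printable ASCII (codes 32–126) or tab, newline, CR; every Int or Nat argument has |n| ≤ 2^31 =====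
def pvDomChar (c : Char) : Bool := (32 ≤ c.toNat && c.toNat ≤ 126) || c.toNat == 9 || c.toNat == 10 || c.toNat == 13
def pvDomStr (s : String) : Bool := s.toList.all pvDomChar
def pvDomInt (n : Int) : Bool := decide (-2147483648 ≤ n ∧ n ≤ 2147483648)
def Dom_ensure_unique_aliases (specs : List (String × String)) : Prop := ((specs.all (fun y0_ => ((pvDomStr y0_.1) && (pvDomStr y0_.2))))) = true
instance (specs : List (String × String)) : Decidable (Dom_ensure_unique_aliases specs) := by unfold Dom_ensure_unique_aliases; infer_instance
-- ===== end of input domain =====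

-- B replaces A's streaming counter pass by a per-distinct-al group-then-scatter traversal
-- (preallocated output filled by index); return values proved equal, no argument is mutated.


-- ===== PORT A =====
def ensure_unique_aliases (specs : List (String × String)) : List (String × String) :=
  (specs.foldl
    (fun (st : PySem.Dict String Int × List (String × String)) p =>
      let counts := st.1.insert p.1 (st.1.getD p.1 0 + 1)
      let c := counts.getD p.1 0
      let final_alias := if c == 1 then p.1 else p.1 ++ "_" ++ PySem.Int.toStr c
      (counts, st.2 ++ [(final_alias, p.2)]))
    (PySem.Dict.empty, [])).2

-- ===== PORT B =====
-- inner loop body: scan (i, (a, voice)) pairs keeping the counter n for `al`, writing out[i] on a hit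
def pvStep (al : String) (st : Int × List (Option (String × String)))
    (p : Int × (String × String)) : Int × List (Option (String × String)) :=
  if p.2.1 == al then
    let n := st.1 + 1
    (n, PySem.List.pySetD st.2 p.1
          (some ((if n == 1 then al else al ++ "_" ++ PySem.Int.toStr n), p.2.2)))
  else st

def ensure_unique_aliases_alt (specs : List (String × String)) : List (String × String) :=
  let out0 : List (Option (String × String)) := List.replicate specs.length none
  let out := (PySem.List.dedup (specs.map Prod.fst)).foldl
    (fun out al => ((PySem.List.enumerate specs 0).foldl (pvStep al) (0, out)).2)
    out0
  -- every slot was written (its al is in the dedup list); `.getD` only discharges the Option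
  out.map (fun o => o.getD ("", ""))

-- ===== PRECONDITION & SPEC =====
def Spec_ensure_unique_aliases (specs : List (String × String)) (out : List (String × String)) : Prop := out = ensure_unique_aliases_alt specs
instance (specs : List (String × String)) (out : List (String × String)) : Decidable (Spec_ensure_unique_aliases specs out) := by unfold Spec_ensure_unique_aliases; infer_instance

-- ===== CLAIM (what is proved, stated in full; the proofs are below) =====
def Claim_equal_ensure_unique_aliases : Prop := ∀ (specs : List (String × String)), Dom_ensure_unique_aliases specs → Spec_ensure_unique_aliases specs (ensure_unique_aliases specs)

-- ===== LEMMAS AND PROOFS =====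

/-- the suffixed name: bare al for the first occurrence, `alias_n` for the n-th -/
def pvMk (a : String) (n : Int) : String :=
  if n == 1 then a else a ++ "_" ++ PySem.Int.toStr n

/-- reference form of the result, recursing with the list of already-seen aliases -/
def pvG (seen : List String) : List (String × String) → List (String × String)
  | [] => []
  | (a, v) :: t => (pvMk a ((seen.count a : Int) + 1), v) :: pvG (seen ++ [a]) t

theorem pvA_loop (l : List (String × String)) :
    ∀ (pre : List String) (d : PySem.Dict String Int) (acc : List (String × String)),
    (∀ b, d.getD b 0 = (pre.count b : Int)) →
    (l.foldl
      (fun (st : PySem.Dict String Int × List (String × String)) p =>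
        let counts := st.1.insert p.1 (st.1.getD p.1 0 + 1)
        let c := counts.getD p.1 0
        let final_alias := if c == 1 then p.1 else p.1 ++ "_" ++ PySem.Int.toStr c
        (counts, st.2 ++ [(final_alias, p.2)]))
      (d, acc)).2 = acc ++ pvG pre l := by
  induction l with
  | nil => intro pre d acc h; simp [pvG]
  | cons p t ih =>
    intro pre d acc h
    obtain ⟨a, v⟩ := p
    have hself : (d.insert a (d.getD a 0 + 1)).getD a 0 = (pre.count a : Int) + 1 := by
      simp [h a]
    have hinv : ∀ b, (d.insert a (d.getD a 0 + 1)).getD b 0 = ((pre ++ [a]).count b : Int) := by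
      intro b
      by_cases hb : b = a
      · subst hb; simp [hself, List.count_append]
      · simp [PySem.Dict.getD_insert, hb, h b, List.count_append, Ne.symm hb]
    simp only [List.foldl_cons]
    rw [ih (pre ++ [a]) _ _ hinv]
    simp only [pvG, hself, pvMk]
    simp

theorem pvG_get (l : List (String × String)) :
    ∀ (seen : List String) (j : Nat),
    (pvG seen l)[j]? = (l[j]?).map
      (fun p => (pvMk p.1 ((seen.count p.1 : Int) + (((l.map Prod.fst).take j).count p.1 : Int) + 1), p.2)) := by
  induction l with
  | nil => intro seen j; simp [pvG]
  | cons p t ih =>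
    obtain ⟨a, v⟩ := p
    intro seen j
    cases j with
    | zero => simp [pvG]
    | succ m =>
      simp only [pvG, List.getElem?_cons_succ, ih (seen ++ [a]) m, List.map_cons, List.take_succ_cons]
      cases h : t[m]? with
      | none => simp
      | some q =>
        simp only [Option.map_some]
        have hx : (((seen ++ [a]).count q.1 : Int)) + ((List.take m (List.map Prod.fst t)).count q.1 : Int) + 1
            = (seen.count q.1 : Int) + ((a :: List.take m (List.map Prod.fst t)).count q.1 : Int) + 1 := by
          by_cases hq : q.1 = a <;>
            · simp [List.count_append, List.count_cons, hq]
              ring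
        rw [hx]

/-- the inner fold preserves the output list's length -/
theorem pvInner_length (c : String) (l : List (String × String)) :
    ∀ (s : Nat) (k : Int) (out : List (Option (String × String))),
    (((PySem.List.enumerate l (s : Int)).foldl (pvStep c) (k, out)).2).length = out.length := by
  induction l with
  | nil => intro s k out; simp [PySem.List.enumerate_nil]
  | cons p t ih =>
    intro s k out
    obtain ⟨a, v⟩ := p
    rw [PySem.List.enumerate_cons, List.foldl_cons]
    have hcast : ((s : Int) + 1) = ((s + 1 : Nat) : Int) := by push_cast; ring
    by_cases ha : a = c
    · simp only [pvStep, ha, hcast]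
      rw [if_pos (by simp)]
      rw [ih]
      simp
    · simp only [pvStep, hcast]
      rw [if_neg (by simp [ha]), ih]

/-- indices whose alias is not `c` (or outside the scanned segment) are left unchanged -/
theorem pvInner_miss (c : String) (l : List (String × String)) :
    ∀ (s : Nat) (k : Int) (out : List (Option (String × String))) (j : Nat),
    (∀ (m : Nat) (hm : m < l.length), j = s + m → (l[m]).1 ≠ c) →
    (((PySem.List.enumerate l (s : Int)).foldl (pvStep c) (k, out)).2)[j]? = out[j]? := by
  induction l with
  | nil => intro s k out j _; simp [PySem.List.enumerate_nil]
  | cons p t ih =>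
    intro s k out j hj
    obtain ⟨a, v⟩ := p
    rw [PySem.List.enumerate_cons, List.foldl_cons]
    have hcast : ((s : Int) + 1) = ((s + 1 : Nat) : Int) := by push_cast; ring
    have hrec : ∀ (m : Nat) (hm : m < t.length), j = (s + 1) + m → (t[m]).1 ≠ c := by
      intro m hm he
      have := hj (m + 1) (by simpa using Nat.succ_lt_succ hm) (by omega)
      simpa using this
    by_cases ha : a = c
    · have hjs : j ≠ s := by
        intro he
        exact hj 0 (by simp) (by omega) ha
      simp only [pvStep, ha, hcast]
      rw [if_pos (by simp)]
      rw [ih _ _ _ _ hrec]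
      simp [PySem.List.pySetD_natCast, List.getElem?_set_ne (Ne.symm hjs)]
    · simp only [pvStep, hcast]
      rw [if_neg (by simp [ha]), ih _ _ _ _ hrec]

/-- a hit: position s+m, where l[m] carries alias c, receives its numbered name -/
theorem pvInner_hit (c : String) (l : List (String × String)) :
    ∀ (s : Nat) (k : Int) (out : List (Option (String × String))) (m : Nat) (hm : m < l.length),
    (l[m]).1 = c → s + m < out.length →
    (((PySem.List.enumerate l (s : Int)).foldl (pvStep c) (k, out)).2)[s + m]? =
      some (some (pvMk c (k + (((l.map Prod.fst).take m).count c : Int) + 1), (l[m]).2)) := by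
  induction l with
  | nil => intro s k out m hm; simp at hm
  | cons p t ih =>
    intro s k out m hm hc hlen
    obtain ⟨a, v⟩ := p
    rw [PySem.List.enumerate_cons, List.foldl_cons]
    have hcast : ((s : Int) + 1) = ((s + 1 : Nat) : Int) := by push_cast; ring
    cases m with
    | zero =>
      simp only [List.getElem_cons_zero] at hc hlen
      simp only [Nat.add_zero] at hlen ⊢
      simp only [pvStep, hc, hcast]
      rw [if_pos (by simp)]
      rw [pvInner_miss c t (s+1) _ _ s (by intro m hm he; omega)]
      simp only [PySem.List.pySetD_natCast]
      rw [List.getElem?_set_self (by simpa using hlen)]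
      simp [pvMk]
    | succ m' =>
      simp only [List.getElem_cons_succ] at hc
      have hm' : m' < t.length := by simpa using Nat.lt_of_succ_lt_succ hm
      by_cases ha : a = c
      · simp only [pvStep, ha, hcast]
        rw [if_pos (by simp)]
        have hih := ih (s+1) (k+1) (PySem.List.pySetD out (s:Int)
          (some ((if k + 1 == 1 then c else c ++ "_" ++ PySem.Int.toStr (k+1)), v))) m' hm' hc
          (by simp [PySem.List.pySetD_natCast]; omega)
        have hcnt : (k + 1) + ((List.take m' (List.map Prod.fst t)).count c : Int) + 1
            = k + ((List.take (m' + 1) (List.map Prod.fst ((c, v) :: t))).count c : Int) + 1 := by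
          simp only [List.map_cons, List.take_succ_cons, List.count_cons]
          simp
          omega
        rw [show s + (m' + 1) = (s + 1) + m' by omega, hih, hcnt]
        simp only [List.getElem_cons_succ]
      · simp only [pvStep, hcast]
        rw [if_neg (by simp [ha])]
        have hih := ih (s+1) k out m' hm' hc (by omega)
        have hcnt : k + ((List.take m' (List.map Prod.fst t)).count c : Int) + 1
            = k + ((List.take (m' + 1) (List.map Prod.fst ((a, v) :: t))).count c : Int) + 1 := by
          simp only [List.map_cons, List.take_succ_cons, List.count_cons]
          simp [ha]
        rw [show s + (m' + 1) = (s + 1) + m' by omega, hih, hcnt]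
        simp only [List.getElem_cons_succ]

/-- the expected final entry at index j -/
def pvExp (specs : List (String × String)) (j : Nat) (h : j < specs.length) : String × String :=
  (pvMk (specs[j]).1 ((((specs.map Prod.fst).take j).count (specs[j]).1 : Int) + 1), (specs[j]).2)

/-- outer fold: a slot is filled with its expected entry iff its al has been processed -/
theorem pvOuter (specs : List (String × String)) :
    ∀ (ds : List String) (out : List (Option (String × String))), out.length = specs.length →
    (ds.foldl (fun o a => ((PySem.List.enumerate specs (0:Int)).foldl (pvStep a) (0, o)).2) out).length = specs.length ∧
    ∀ (j : Nat) (hj : j < specs.length),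
      (ds.foldl (fun o a => ((PySem.List.enumerate specs (0:Int)).foldl (pvStep a) (0, o)).2) out)[j]? =
        if (specs[j]).1 ∈ ds then some (some (pvExp specs j hj)) else out[j]? := by
  intro ds
  induction ds with
  | nil => intro out hlen; exact ⟨hlen, by intro j hj; simp⟩
  | cons d ds ih =>
    intro out hlen
    have hlen' : (((PySem.List.enumerate specs (0:Int)).foldl (pvStep d) (0, out)).2).length = specs.length := by
      have := pvInner_length d specs 0 0 out
      simp only [Nat.cast_zero] at this
      rw [this, hlen]
    obtain ⟨hL, hIH⟩ := ih _ hlen'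
    refine ⟨by simpa using hL, ?_⟩
    intro j hj
    rw [List.foldl_cons, hIH j hj]
    by_cases hmem : (specs[j]).1 ∈ ds
    · simp [hmem, List.mem_cons]
    · by_cases hd : (specs[j]).1 = d
      · have hhit := pvInner_hit d specs 0 0 out j hj hd (by omega)
        simp only [Nat.cast_zero, Nat.zero_add] at hhit
        simp only [List.mem_cons, hd, true_or, if_pos]
        rw [hhit]
        simp [pvExp, hd]
      · have hmiss := pvInner_miss d specs 0 0 out j
          (by intro m hm he
              have hmj : m = j := by omega
              subst hmj
              exact hd)
        simp only [Nat.cast_zero] at hmiss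
        simp only [List.mem_cons, hmem, hd, or_self, if_neg, not_false_iff]
        rw [hmiss]

-- ===== VERDICT (by name: the statement is the Claim_ definition above) =====
theorem ensure_unique_aliases_spec : Claim_equal_ensure_unique_aliases := by
  intro specs _
  unfold Spec_ensure_unique_aliases ensure_unique_aliases ensure_unique_aliases_alt
  rw [pvA_loop specs [] _ _ (by intro b; simp [PySem.Dict.getD_empty])]
  simp only [List.nil_append]
  obtain ⟨hL, hG⟩ := pvOuter specs (PySem.List.dedup (specs.map Prod.fst))
    (List.replicate specs.length none) (by simp)
  apply List.ext_getElem?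
  intro j
  rw [pvG_get specs [] j, List.getElem?_map]
  by_cases hj : j < specs.length
  · rw [hG j hj]
    have hmem : (specs[j]).1 ∈ PySem.List.dedup (specs.map Prod.fst) := by
      rw [PySem.List.mem_dedup]
      exact List.mem_map_of_mem (List.getElem_mem hj)
    simp only [PySem.List.dedup_eq_ofList] at hmem
    simp [hmem, pvExp, List.getElem?_eq_getElem hj]
  · have h1 : specs[j]? = none := List.getElem?_eq_none (by omega)
    have h2 : ((PySem.List.dedup (specs.map Prod.fst)).foldl
        (fun o a => ((PySem.List.enumerate specs (0:Int)).foldl (pvStep a) (0, o)).2)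
        (List.replicate specs.length none))[j]? = none := by
      apply List.getElem?_eq_none
      omega
    rw [h1, h2]
    simp
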